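-- pv_equiv track=rewrite | github.com/kamalsai369/Adobe1B | collection1/output.py | extract_meaningful_title
-- ===== SOURCE A (Python) =====
-- def extract_meaningful_title(text, max_length=100):
--     """Extract a meaningful title from text."""
--     lines = [line.strip() for line in text.split('\n') if line.strip()]
--     if not lines:
--         return "Untitled Section"
--
--     # Try to find section headers by looking at formatting patterns
--     for line in lines[:10]:  # Look at first 10 lines
--         # Check if line looks like a title (short, capitalized, no period at end)
--         if 2 < len(line.split()) < 8 and line[0].isupper() and not line.endswith('.'):
--             return line[:max_length]
--
--     # Fall back to the first substantive line
--     for line in lines[:5]: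
--         if len(line) > 10:
--             return line[:max_length]
--
--     return lines[0][:max_length]
-- ===== SOURCE B (Python) =====
-- def extract_meaningful_title(text, max_length=100):
--     """Extract a meaningful title from text (single-pass re-implementation)."""
--     lines = [line.strip() for line in text.split('\n') if line.strip()]
--     if not lines:
--         return "Untitled Section"
--     title = None
--     substantive = None
--     for i, line in enumerate(lines[:10]):
--         if title is None and 2 < len(line.split()) < 8 and line[0].isupper() and not line.endswith('.'):
--             title = line
--         if substantive is None and i < 5 and len(line) > 10:
--             substantive = line
--     if title is not None:
--         return title[:max_length]
--     if substantive is not None: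
--         return substantive[:max_length]
--     return lines[0][:max_length]
-- ===== Notes on version B (the rewrite author's own statement) =====
-- stated objective: alternative
-- what changed: Replaces A's two sequential early-returning scans (title pass over lines[:10], then substantive pass over lines[:5]) with a single enumerated traversal of lines[:10] maintaining two first-match accumulators and deciding afterwards.
import Mathlib
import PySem

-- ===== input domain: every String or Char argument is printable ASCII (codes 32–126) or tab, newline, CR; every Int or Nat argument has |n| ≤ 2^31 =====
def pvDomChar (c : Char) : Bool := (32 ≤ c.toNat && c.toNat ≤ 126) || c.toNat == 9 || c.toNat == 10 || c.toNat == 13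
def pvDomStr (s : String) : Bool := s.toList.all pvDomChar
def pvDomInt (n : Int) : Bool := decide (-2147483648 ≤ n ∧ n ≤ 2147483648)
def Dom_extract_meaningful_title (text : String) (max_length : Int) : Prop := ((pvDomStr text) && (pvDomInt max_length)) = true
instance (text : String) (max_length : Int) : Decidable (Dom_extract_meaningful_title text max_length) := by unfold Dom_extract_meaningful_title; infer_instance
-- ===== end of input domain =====

-- B replaces A's two sequential early-returning scans with one enumerated pass keeping two
-- first-match accumulators (alternative decomposition, same cost); return values proved equal.


-- ===== PORT A =====
-- lines = [line.strip() for line in text.split('\n') if line.strip()]  (shared: both Pythons start identically)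
def pvLines (text : String) : List (List Char) :=
  ((PySem.Chars.splitOn text.toList ['\n']).map PySem.Chars.strip).filter (· ≠ [])

-- 2 < len(line.split()) < 8 and line[0].isupper() and not line.endswith('.')
-- (line[0] via pyGet?; the none branch is unreachable here since lines are stripped nonempty)
def pvIsTitle (line : List Char) : Bool :=
  (decide (2 < (PySem.Chars.split₀ line).length) && decide ((PySem.Chars.split₀ line).length < 8))
  && (match PySem.List.pyGet? line 0 with | some c => PySem.Chars.isupper c | none => false)
  && !(PySem.Chars.endswith line ['.'])

-- first early-returning loop of A
def pvFindTitle : List (List Char) → Option (List Char)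
  | [] => none
  | l :: ls => if pvIsTitle l then some l else pvFindTitle ls

-- second early-returning loop of A
def pvFindSubst : List (List Char) → Option (List Char)
  | [] => none
  | l :: ls => if decide (10 < l.length) then some l else pvFindSubst ls

def extract_meaningful_title (text : String) (max_length : Int) : String :=
  let lines := pvLines text
  match lines with
  | [] => "Untitled Section"
  | first :: _ =>
    match pvFindTitle (PySem.List.slice lines none (some 10)) with
    | some l => String.ofList (PySem.Chars.slice l none (some max_length))
    | none =>
      match pvFindSubst (PySem.List.slice lines none (some 5)) with
      | some l => String.ofList (PySem.Chars.slice l none (some max_length))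
      | none => String.ofList (PySem.Chars.slice first none (some max_length))

-- ===== PORT B =====
-- loop body of B: two 'first match wins' accumulators, the substantive one only while i < 5
def pvScan (st : Option (List Char) × Option (List Char)) (p : Int × List Char) :
    Option (List Char) × Option (List Char) :=
  (if st.1.isNone && pvIsTitle p.2 then some p.2 else st.1,
   if st.2.isNone && decide (p.1 < 5) && decide (10 < p.2.length) then some p.2 else st.2)

def extract_meaningful_title_alt (text : String) (max_length : Int) : String :=
  let lines := pvLines text
  match lines with
  | [] => "Untitled Section"
  | first :: _ =>
    let st := (PySem.List.enumerate (PySem.List.slice lines none (some 10))).foldl pvScan (none, none)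
    match st.1 with
    | some l => String.ofList (PySem.Chars.slice l none (some max_length))
    | none =>
      match st.2 with
      | some l => String.ofList (PySem.Chars.slice l none (some max_length))
      | none => String.ofList (PySem.Chars.slice first none (some max_length))

-- ===== PRECONDITION & SPEC =====
def Spec_extract_meaningful_title (text : String) (max_length : Int) (out : String) : Prop := out = extract_meaningful_title_alt text max_length
instance (text : String) (max_length : Int) (out : String) : Decidable (Spec_extract_meaningful_title text max_length out) := by unfold Spec_extract_meaningful_title; infer_instance

-- ===== CLAIM (what is proved, stated in full; the proofs are below) =====
def Claim_equal_extract_meaningful_title : Prop := ∀ (text : String) (max_length : Int), Dom_extract_meaningful_title text max_length → Spec_extract_meaningful_title text max_length (extract_meaningful_title text max_length)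

-- ===== LEMMAS AND PROOFS =====
-- the fold computes exactly the two first matches A's loops compute
lemma pvScan_spec (ls : List (List Char)) (i : Nat) (t s : Option (List Char)) :
    (PySem.List.enumerate ls (i : Int)).foldl pvScan (t, s)
      = (t.or (pvFindTitle ls), s.or (pvFindSubst (ls.take (5 - i)))) := by
  induction ls generalizing i t s with
  | nil => simp [PySem.List.enumerate_nil, pvFindTitle, pvFindSubst]
  | cons x ls ih =>
    rw [PySem.List.enumerate_cons, List.foldl_cons]
    have hcast : (i : Int) + 1 = ((i + 1 : Nat) : Int) := by push_cast; ring
    rw [hcast, ih]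
    by_cases h5 : i < 5
    · have h1 : 5 - i = (5 - (i + 1)) + 1 := by omega
      have h2 : ((i : Int) < 5) = True := by simp; omega
      rw [h1]
      cases t <;> cases s <;>
        simp [pvScan, pvFindTitle, pvFindSubst, h2, Option.or] <;>
        split_ifs <;> simp_all
    · have h1 : 5 - i = 0 := by omega
      have h1' : 5 - (i + 1) = 0 := by omega
      have h2 : ((i : Int) < 5) = False := by simp; omega
      rw [h1, h1']
      cases t <;> cases s <;>
        simp [pvScan, pvFindTitle, pvFindSubst, h2, Option.or] <;>
        split_ifs <;> simp_all

lemma pvScan_main (lines : List (List Char)) :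
    (PySem.List.enumerate (PySem.List.slice lines none (some 10))).foldl pvScan (none, none)
      = (pvFindTitle (PySem.List.slice lines none (some 10)),
         pvFindSubst (PySem.List.slice lines none (some 5))) := by
  have h10 : PySem.List.slice lines none (some (10 : Int)) = lines.take 10 := by
    simpa using PySem.List.slice_to_natCast lines 10
  have h5 : PySem.List.slice lines none (some (5 : Int)) = lines.take 5 := by
    simpa using PySem.List.slice_to_natCast lines 5
  have := pvScan_spec (lines.take 10) 0 none none
  simp only [Nat.sub_zero, Nat.cast_zero] at this
  rw [h10, h5, this, List.take_take]
  simp [Option.or]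

-- ===== VERDICT (by name: the statement is the Claim_ definition above) =====
theorem extract_meaningful_title_spec : Claim_equal_extract_meaningful_title := by
  intro text max_length _
  unfold Spec_extract_meaningful_title extract_meaningful_title extract_meaningful_title_alt
  cases h : pvLines text with
  | nil => simp
  | cons first rest =>
    simp only []
    rw [pvScan_main (first :: rest)]
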